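-- pv_equiv track=rewrite | github.com/adam-sierakowski/pangram_aid_webapp | utils/search_dict.py | mask_from_letters
-- ===== SOURCE A (Python) =====
-- import argparse, json, sys, unicodedata, os, gzip
--
-- def nfc(s:str)->str:
--     return unicodedata.normalize("NFC", s)
--
-- def mask_from_letters(s:str, pos_map:dict)->int:
--     # casefold for robust matching; keep only chars present in alphabet
--     s_cf = nfc(s).casefold()
--     m = 0
--     for ch in s_cf:
--         i = pos_map.get(ch, -1)
--         if i >= 0:
--             bit = 1 << i
--             # reject duplicates for EXACT intent? not needed for mask; duplicates don't matter
--             m |= bit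
--     return m
-- ===== SOURCE B (Python) =====
-- import unicodedata
--
-- def nfc(s: str) -> str:
--     return unicodedata.normalize("NFC", s)
--
-- def mask_from_letters(s: str, pos_map: dict) -> int:
--     # Invert the traversal: iterate the alphabet map once, testing membership
--     # in a prebuilt set of the normalized string's characters.
--     s_set = set(nfc(s).casefold())
--     m = 0
--     for ch, i in pos_map.items():
--         if i >= 0 and ch in s_set:
--             m |= 1 << i
--     return m
-- ===== Notes on version B (the rewrite author's own statement) =====
-- stated objective: alternative
-- what changed: B inverts the iteration axis: instead of scanning every character of the string and looking each one up in the dict, it builds a set of the string's (NFC+casefolded) characters once and loops over the alphabet map's items, OR-ing in the bit for each non-negative position whose key is present in that set.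
import Mathlib
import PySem

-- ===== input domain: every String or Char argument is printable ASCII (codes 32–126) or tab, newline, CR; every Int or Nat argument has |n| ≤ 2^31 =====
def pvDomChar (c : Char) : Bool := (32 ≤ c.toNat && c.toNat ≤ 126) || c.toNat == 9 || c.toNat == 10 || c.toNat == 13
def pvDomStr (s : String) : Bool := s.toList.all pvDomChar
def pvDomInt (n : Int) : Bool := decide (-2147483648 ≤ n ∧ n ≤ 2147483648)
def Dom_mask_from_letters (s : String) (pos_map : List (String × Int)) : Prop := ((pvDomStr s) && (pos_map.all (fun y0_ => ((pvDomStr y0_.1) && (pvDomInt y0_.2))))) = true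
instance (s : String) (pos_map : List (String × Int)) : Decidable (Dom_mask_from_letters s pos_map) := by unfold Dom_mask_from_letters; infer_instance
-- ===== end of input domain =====

-- B changes the iteration axis (loop over the alphabet map with a prebuilt set of the
-- string's characters, instead of scanning the string and looking up each character);
-- objective: alternative (same cost, different traversal).

-- ===== PORT A =====
-- unicodedata.normalize("NFC", s): identity on the ASCII domain (Dom); exact there.
def pvNfc (s : String) : String := s

def mask_from_letters (s : String) (pos_map : List (String × Int)) : Int :=
  -- str.casefold coincides with str.lower on ASCII (Dom); PySem.Str.lower is exact there.
  let s_cf := PySem.Str.lower (pvNfc s)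
  s_cf.toList.foldl (fun m ch =>
    let i := (PySem.Dict.mk pos_map).getD (String.mk [ch]) (-1)
    if 0 ≤ i then
      let bit : Int := (1 : Int) <<< i.toNat   -- 1 << i (guarded by 0 ≤ i)
      PySem.Int.bor m bit                       -- m |= bit
    else m) 0

-- ===== PORT B =====
def mask_from_letters_alt (s : String) (pos_map : List (String × Int)) : Int :=
  -- set(nfc(s).casefold()): the distinct one-character strings of the normalized string
  let s_set : PySem.Set String :=
    PySem.Set.ofList ((PySem.Str.lower (pvNfc s)).toList.map (fun c => String.mk [c]))
  pos_map.foldl (fun m e =>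
    if (0:Int) ≤ e.2 ∧ PySem.Set.contains s_set e.1 = true then
      PySem.Int.bor m ((1 : Int) <<< e.2.toNat)   -- m |= 1 << i
    else m) 0

-- ===== PRECONDITION & SPEC =====
-- Pre_ requires the association list's keys to be distinct — every real Python dict
-- satisfies this (a dict cannot hold duplicate keys, so no Python input is excluded);
-- on a raw list with duplicate keys A's first-match lookup and B's scan over all
-- entries would read the "dict" differently.
def Pre_mask_from_letters (s : String) (pos_map : List (String × Int)) : Prop :=
  (pos_map.map Prod.fst).Nodup
instance (s : String) (pos_map : List (String × Int)) : Decidable (Pre_mask_from_letters s pos_map) := by unfold Pre_mask_from_letters; infer_instance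

def pvWitness_mask_from_letters : String × (List (String × Int)) :=
  ("ba!", [("a", 0), ("b", 1), ("?", -1)])

def Spec_mask_from_letters (s : String) (pos_map : List (String × Int)) (out : Int) : Prop := out = mask_from_letters_alt s pos_map
instance (s : String) (pos_map : List (String × Int)) (out : Int) : Decidable (Spec_mask_from_letters s pos_map out) := by unfold Spec_mask_from_letters; infer_instance

-- ===== CLAIM (what is proved, stated in full; the proofs are below) =====
def Claim_equal_mask_from_letters : Prop := ∀ (s : String) (pos_map : List (String × Int)), Dom_mask_from_letters s pos_map → Pre_mask_from_letters s pos_map → Spec_mask_from_letters s pos_map (mask_from_letters s pos_map)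

-- ===== LEMMAS AND PROOFS =====

-- per-character contribution of A's loop, as a Nat
def pvFA (pm : List (String × Int)) (c : Char) : Nat :=
  let i := (PySem.Dict.mk pm).getD (String.mk [c]) (-1)
  if 0 ≤ i then 1 <<< i.toNat else 0

-- per-entry contribution of B's loop, as a Nat
def pvGB (ss : List String) (e : String × Int) : Nat :=
  if (0:Int) ≤ e.2 ∧ PySem.Set.contains ss e.1 = true then 1 <<< e.2.toNat else 0

theorem pv_shift_cast (k : Nat) : ((1 : Int) <<< k) = ((1 <<< k : Nat) : Int) := by
  rw [← Int.shiftLeft_natCast_right, ← Int.shiftLeft_natCast]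
  norm_num

theorem pv_shift_cast' (k : Nat) : ((1 : Int) <<< ((k : Nat) : Int)) = ((1 <<< k : Nat) : Int) := by
  rw [← Int.shiftLeft_natCast]
  norm_num

theorem pv_testBit_foldl_or {α : Type} (f : α → Nat) (l : List α) (n j : Nat) :
    (l.foldl (fun a x => a ||| f x) n).testBit j
      = (n.testBit j || l.any fun x => (f x).testBit j) := by
  induction l generalizing n with
  | nil => simp
  | cons x xs ih => simp [ih, Nat.testBit_or, Bool.or_assoc]

theorem pv_foldl_bor_cast {α : Type} (f : α → Nat) (l : List α) (n : Nat) :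
    l.foldl (fun a x => PySem.Int.bor a ((f x : Nat) : Int)) (n : Int)
      = ((l.foldl (fun a x => a ||| f x) n : Nat) : Int) := by
  induction l generalizing n with
  | nil => simp
  | cons x xs ih => simp [PySem.Int.bor_natCast, ih]

theorem pv_get?_mk_iff (pm : List (String × Int)) (h : (pm.map Prod.fst).Nodup)
    (k : String) (v : Int) :
    (PySem.Dict.mk pm).get? k = some v ↔ (k, v) ∈ pm := by
  induction pm with
  | nil => simp [PySem.Dict.get?]
  | cons e rest ih =>
    obtain ⟨a, b⟩ := e
    simp only [List.map_cons, List.nodup_cons] at h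
    rw [PySem.Dict.get?_mk_cons]
    by_cases hk : a = k
    · subst hk
      rw [if_pos (by simp)]
      constructor
      · intro h'
        injection h' with h'
        subst h'
        exact List.mem_cons_self
      · intro h'
        rcases List.mem_cons.mp h' with h' | h'
        · injection h' with h1 h2; exact congrArg some h2.symm
        · exact absurd (List.mem_map_of_mem (f := Prod.fst) h') (by simpa using h.1)
    · rw [if_neg (by simpa using hk), ih h.2]
      constructor
      · intro h'; exact List.mem_cons_of_mem _ h'
      · intro h'
        rcases List.mem_cons.mp h' with h' | h'
        · exact absurd (congrArg Prod.fst h').symm (by simpa using hk)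
        · exact h'

theorem pv_testBit_pvFA (pm : List (String × Int)) (c : Char) (j : Nat) :
    (pvFA pm c).testBit j = true ↔ (PySem.Dict.mk pm).get? (String.mk [c]) = some ((j : Nat) : Int) := by
  unfold pvFA
  cases hg : (PySem.Dict.mk pm).get? (String.mk [c]) with
  | none =>
      simp [PySem.Dict.getD, hg]
  | some i =>
      simp only [PySem.Dict.getD, hg, Option.getD_some]
      split_ifs with hi
      · rw [Nat.one_shiftLeft, Nat.testBit_two_pow]
        constructor
        · intro h'
          have := of_decide_eq_true h'
          exact congrArg some (by omega)
        · intro h'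
          injection h' with h'
          simp only [decide_eq_true_eq]
          omega
      · simp only [Nat.zero_testBit]
        constructor
        · intro h'; cases h'
        · intro h'
          injection h' with h'
          exact absurd h' (by omega)

theorem pv_testBit_pvGB (ss : List String) (e : String × Int) (j : Nat) :
    (pvGB ss e).testBit j = true ↔ (e.2 = ((j : Nat) : Int) ∧ PySem.Set.contains ss e.1 = true) := by
  unfold pvGB
  split_ifs with hi
  · rw [Nat.one_shiftLeft, Nat.testBit_two_pow]
    constructor
    · intro h'
      have := of_decide_eq_true h'
      exact ⟨by omega, hi.2⟩
    · rintro ⟨h', _⟩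
      simp only [decide_eq_true_eq]
      omega
  · simp only [Nat.zero_testBit]
    constructor
    · intro h'; cases h'
    · rintro ⟨h', hm⟩
      exact (hi ⟨by omega, hm⟩).elim

theorem mask_from_letters_spec : Claim_equal_mask_from_letters := by
  intro s pos_map _ hpre
  unfold Spec_mask_from_letters mask_from_letters mask_from_letters_alt
  simp only []
  set t := (PySem.Str.lower (pvNfc s)).toList with ht
  set singles := t.map (fun c => String.mk [c]) with hsingles
  -- rewrite both loops into the `bor`-of-contribution shape
  have hA : t.foldl (fun m ch =>
      let i := (PySem.Dict.mk pos_map).getD (String.mk [ch]) (-1)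
      if 0 ≤ i then PySem.Int.bor m ((1 : Int) <<< i.toNat) else m) (0 : Int)
      = t.foldl (fun a c => PySem.Int.bor a ((pvFA pos_map c : Nat) : Int)) ((0 : Nat) : Int) := by
    rw [show ((0:Nat) : Int) = (0 : Int) by norm_num]
    apply List.foldl_ext
    intro a c _
    simp only [pvFA]
    split_ifs with hi
    · rw [pv_shift_cast]
    · simp [PySem.Int.bor_zero]
  have hB : pos_map.foldl (fun m e =>
      if (0:Int) ≤ e.2 ∧ PySem.Set.contains (PySem.Set.ofList singles) e.1 = true then
        PySem.Int.bor m ((1 : Int) <<< e.2.toNat)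
      else m) (0 : Int)
      = pos_map.foldl (fun a e => PySem.Int.bor a ((pvGB (PySem.Set.ofList singles) e : Nat) : Int)) ((0 : Nat) : Int) := by
    rw [show ((0:Nat) : Int) = (0 : Int) by norm_num]
    apply List.foldl_ext
    intro a e _
    simp only [pvGB]
    split_ifs with hi
    · rw [pv_shift_cast']
    · simp [PySem.Int.bor_zero]
  rw [hA, hB, pv_foldl_bor_cast, pv_foldl_bor_cast]
  congr 1
  apply Nat.eq_of_testBit_eq
  intro j
  rw [pv_testBit_foldl_or, pv_testBit_foldl_or]
  simp only [Nat.zero_testBit, Bool.false_or]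
  rw [Bool.eq_iff_iff]
  simp only [List.any_eq_true]
  constructor
  · rintro ⟨c, hc, hbit⟩
    rw [pv_testBit_pvFA] at hbit
    refine ⟨(String.mk [c], (j : Int)), (pv_get?_mk_iff pos_map hpre _ _).mp hbit, ?_⟩
    rw [pv_testBit_pvGB]
    refine ⟨rfl, ?_⟩
    rw [PySem.Set.contains_iff, PySem.Set.mem_ofList, hsingles]
    exact List.mem_map_of_mem hc
  · rintro ⟨e, he, hbit⟩
    rw [pv_testBit_pvGB] at hbit
    obtain ⟨hej, hmem⟩ := hbit
    rw [PySem.Set.contains_iff, PySem.Set.mem_ofList, hsingles, List.mem_map] at hmem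
    obtain ⟨c, hc, hck⟩ := hmem
    refine ⟨c, hc, ?_⟩
    rw [pv_testBit_pvFA, hck]
    rw [pv_get?_mk_iff pos_map hpre]
    rw [← hej]
    exact he
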